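-- pv_equiv track=rewrite | github.com/SaarShai/Primes-Equispaced | experiments/composites_exact_deltaW.py | mertens_function
-- ===== SOURCE A (Python) =====
-- def mertens_function(max_n):
--     """Compute Mertens function M(n) for n up to max_n."""
--     mu = [0] * (max_n + 1)
--     mu[1] = 1
--     is_p = [True] * (max_n + 1)
--     is_p[0] = is_p[1] = False
--     primes = []
--     for i in range(2, max_n + 1):
--         if is_p[i]:
--             primes.append(i)
--             mu[i] = -1
--         for q in primes:
--             if i * q > max_n: break
--             is_p[i * q] = False
--             if i % q == 0:
--                 mu[i * q] = 0
--                 break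
--             else:
--                 mu[i * q] = -mu[i]
--     M = [0] * (max_n + 1)
--     for k in range(1, max_n + 1):
--         M[k] = M[k - 1] + mu[k]
--     return M, mu
-- ===== SOURCE B (Python) =====
-- def mertens_function(max_n):
--     """Compute Mertens function M(n) for n up to max_n.
--
--     Per-number smallest-prime-factor recurrence instead of a linear sieve:
--     mu(n) = 0 if spf(n)^2 | n else -mu(n // spf(n)), filled left to right.
--     """
--     mu = [0] * (max_n + 1)
--     mu[1] = 1
--     for n in range(2, max_n + 1):
--         p = 2
--         while p * p <= n and n % p != 0:
--             p += 1
--         if p * p > n: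
--             p = n
--         m = n // p
--         mu[n] = 0 if m % p == 0 else -mu[m]
--     M = [0] * (max_n + 1)
--     for k in range(1, max_n + 1):
--         M[k] = M[k - 1] + mu[k]
--     return M, mu
-- ===== Notes on version B (the rewrite author's own statement) =====
-- stated objective: alternative
-- what changed: Replaces the shared-state linear (Euler) sieve over is_prime/primes arrays by an independent per-number smallest-prime-factor recurrence: each mu[n] is computed from trial division up to sqrt(n) and mu[n // spf(n)], with the same prefix-sum pass for M.
import Mathlib
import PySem

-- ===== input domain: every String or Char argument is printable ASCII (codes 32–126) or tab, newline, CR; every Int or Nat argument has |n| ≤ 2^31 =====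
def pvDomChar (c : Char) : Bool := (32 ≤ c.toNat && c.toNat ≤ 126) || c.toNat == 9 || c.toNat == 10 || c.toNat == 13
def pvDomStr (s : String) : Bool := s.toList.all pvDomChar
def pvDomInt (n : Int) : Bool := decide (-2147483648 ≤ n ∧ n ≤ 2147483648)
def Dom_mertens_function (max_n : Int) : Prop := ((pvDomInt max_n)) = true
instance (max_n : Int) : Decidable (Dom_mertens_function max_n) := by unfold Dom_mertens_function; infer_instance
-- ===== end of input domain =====

-- B replaces A's linear (Euler) sieve by a per-number smallest-prime-factor recurrence
-- (trial division up to √n, then mu[n] from mu[n // spf(n)]); objective: alternative, not faster.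

-- ===== PORT A =====
-- inner `for q in primes` loop with its two breaks
def mfInnerA (N i : Nat) (primes : List Nat) (mu : List Int) (isp : List Bool) :
    List Int × List Bool :=
  match primes with
  | [] => (mu, isp)
  | q :: rest =>
    if N < i * q then (mu, isp)
    else
      let isp' := isp.set (i * q) false
      if i % q = 0 then (mu.set (i * q) 0, isp')
      else mfInnerA N i rest (mu.set (i * q) (-(mu.getD i 0))) isp'

-- one iteration of the outer `for i in range(2, max_n + 1)` loop
def mfStepA (N : Nat) (st : List Int × List Bool × List Nat) (i : Nat) :
    List Int × List Bool × List Nat :=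
  let primes' := if st.2.1.getD i false then st.2.2 ++ [i] else st.2.2
  let mu' := if st.2.1.getD i false then st.1.set i (-1) else st.1
  let r := mfInnerA N i primes' mu' st.2.1
  (r.1, r.2, primes')

-- the final `M[k] = M[k-1] + mu[k]` prefix loop of A
def mfPrefixA (N : Nat) (mu : List Int) : List Int :=
  (List.range' 1 N).foldl (fun M k => M.set k (M.getD (k - 1) 0 + mu.getD k 0))
    (List.replicate (N + 1) (0 : Int))

-- the sieve phase of A: initial arrays, then the outer loop; returns the final mu
def mfRunA (N : Nat) : List Int :=
  ((List.range' 2 (N - 1)).foldl (mfStepA N)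
    ((List.replicate (N + 1) (0 : Int)).set 1 1,
     ((List.replicate (N + 1) true).set 0 false).set 1 false, ([] : List Nat))).1

def mertens_function (max_n : Int) : List Int × List Int :=
  (mfPrefixA max_n.toNat (mfRunA max_n.toNat), mfRunA max_n.toNat)

-- ===== PORT B =====
-- `while p * p <= n and n % p != 0: p += 1`
def mfSpfLoopB (n p : Nat) : Nat :=
  if p * p ≤ n ∧ n % p ≠ 0 then mfSpfLoopB n (p + 1) else p
termination_by n + 1 - p
decreasing_by
  rename_i h
  obtain ⟨h1, h2⟩ := h
  rcases Nat.eq_zero_or_pos p with hp | hp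
  · subst hp; simp at h2; omega
  · have : p ≤ p * p := Nat.le_mul_of_pos_left p hp
    omega

-- trial-division smallest prime factor: the `p = 2; while …; if p*p > n: p = n` block
def mfSpfB (n : Nat) : Nat :=
  let p := mfSpfLoopB n 2
  if n < p * p then n else p

-- one iteration of B's `for n in range(2, max_n + 1)` loop
def mfStepB (mu : List Int) (n : Nat) : List Int :=
  let p := mfSpfB n
  let m := n / p
  mu.set n (if m % p = 0 then 0 else -(mu.getD m 0))

-- the final `M[k] = M[k-1] + mu[k]` prefix loop of B
def mfPrefixB (N : Nat) (mu : List Int) : List Int :=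
  (List.range' 1 N).foldl (fun M k => M.set k (M.getD (k - 1) 0 + mu.getD k 0))
    (List.replicate (N + 1) (0 : Int))

-- the mu-filling phase of B
def mfRunB (N : Nat) : List Int :=
  (List.range' 2 (N - 1)).foldl mfStepB ((List.replicate (N + 1) (0 : Int)).set 1 1)

def mertens_function_alt (max_n : Int) : List Int × List Int :=
  (mfPrefixB max_n.toNat (mfRunB max_n.toNat), mfRunB max_n.toNat)

-- ===== PRECONDITION & SPEC =====
-- Pre_ excludes exactly the non-positive max_n, on which the Python A raises IndexError
-- at its first list assignment (B raises there too); on every positive max_n A returns normally.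
def Pre_mertens_function (max_n : Int) : Prop := 1 ≤ max_n
instance (max_n : Int) : Decidable (Pre_mertens_function max_n) := by
  unfold Pre_mertens_function; infer_instance

def pvWitness_mertens_function : Int := 6

def Spec_mertens_function (max_n : Int) (out : List Int × List Int) : Prop :=
  out = mertens_function_alt max_n
instance (max_n : Int) (out : List Int × List Int) : Decidable (Spec_mertens_function max_n out) := by
  unfold Spec_mertens_function; infer_instance

-- ===== CLAIM (what is proved, stated in full; the proofs are below) =====
def Claim_equal_mertens_function : Prop :=
  ∀ (max_n : Int), Dom_mertens_function max_n → Pre_mertens_function max_n →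
    Spec_mertens_function max_n (mertens_function max_n)

-- ===== LEMMAS AND PROOFS =====

-- the Möbius function via the smallest-prime-factor recurrence (the common spec of both mu arrays)
def muSpec : Nat → Int
  | 0 => 0
  | 1 => 1
  | (n + 2) =>
    let p := (n + 2).minFac
    if ((n + 2) / p) % p = 0 then 0 else -muSpec ((n + 2) / p)
termination_by n => n
decreasing_by
  have h1 : (1:Nat) < (n + 2).minFac := (Nat.minFac_prime (by omega)).one_lt
  have := Nat.div_lt_self (show 0 < n + 2 by omega) h1
  omega

-- basic list-update facts
theorem getD_set_self {α : Type} (l : List α) (i : Nat) (v d : α) (h : i < l.length) :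
    (l.set i v).getD i d = v := by
  simp [List.getD_eq_getElem?_getD, h]

theorem getD_set_ne {α : Type} (l : List α) (i j : Nat) (v d : α) (h : j ≠ i) :
    (l.set i v).getD j d = l.getD j d := by
  simp [List.getD_eq_getElem?_getD, List.getElem?_set_ne (by omega : i ≠ j)]

theorem muSpec_eq (n : Nat) (h : 2 ≤ n) :
    muSpec n = if (n / n.minFac) % n.minFac = 0 then 0 else -muSpec (n / n.minFac) := by
  obtain ⟨m, rfl⟩ : ∃ m, n = m + 2 := ⟨n - 2, by omega⟩
  rw [muSpec]

theorem muSpec_prime (p : Nat) (hp : p.Prime) : muSpec p = -1 := by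
  rw [muSpec_eq p hp.two_le, hp.minFac_eq, Nat.div_self hp.pos]
  have h1 : 1 % p = 1 := Nat.mod_eq_of_lt hp.one_lt
  simp [h1, muSpec]

theorem minFac_mul_eq (i q : Nat) (hq : q.Prime) (hi : 2 ≤ i) (hle : q ≤ i.minFac) :
    (i * q).minFac = q := by
  have hne : i * q ≠ 1 := by
    have := hq.two_le; intro h
    have := Nat.eq_one_of_mul_eq_one_left h; omega
  have hle1 : (i * q).minFac ≤ q :=
    Nat.minFac_le_of_dvd hq.two_le ⟨i, Nat.mul_comm i q⟩
  have hp := Nat.minFac_prime hne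
  have hdvd : (i * q).minFac ∣ i * q := Nat.minFac_dvd _
  rcases (Nat.Prime.dvd_mul hp).mp hdvd with h | h
  · have : i.minFac ≤ (i * q).minFac := Nat.minFac_le_of_dvd hp.two_le h
    omega
  · exact (Nat.prime_dvd_prime_iff_eq hp hq).mp h

theorem muSpec_mul (i q : Nat) (hq : q.Prime) (hi : 2 ≤ i) (hle : q ≤ i.minFac) :
    muSpec (i * q) = if i % q = 0 then 0 else -muSpec i := by
  have h2 : 2 ≤ i * q := le_trans hi (Nat.le_mul_of_pos_right i hq.pos)
  rw [muSpec_eq _ h2, minFac_mul_eq i q hq hi hle, Nat.mul_div_cancel i hq.pos]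

-- composite decomposition facts
theorem composite_cofactor_ge_two (k : Nat) (h2 : 2 ≤ k) (hnp : ¬ k.Prime) :
    2 ≤ k / k.minFac := by
  have hp := Nat.minFac_prime (show k ≠ 1 by omega)
  have hne : k.minFac ≠ k := by
    intro h; exact hnp (by rw [Nat.prime_def_minFac]; exact ⟨h2, h⟩)
  have hdvd : k.minFac ∣ k := Nat.minFac_dvd k
  have hle : k.minFac ≤ k := Nat.le_of_dvd (by omega) hdvd
  have h1 : 1 ≤ k / k.minFac := (Nat.one_le_div_iff hp.pos).mpr hle
  rcases Nat.lt_or_ge 1 (k / k.minFac) with h | h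
  · omega
  · exfalso
    have h1' : k / k.minFac = 1 := by omega
    have heq := Nat.div_mul_cancel hdvd
    rw [h1', one_mul] at heq
    exact hne heq

theorem cofactor_lt (k : Nat) (h2 : 2 ≤ k) : k / k.minFac < k :=
  Nat.div_lt_self (by omega) (Nat.minFac_prime (by omega)).one_lt

-- value patterns maintained by A's outer loop
def muPat (i k : Nat) : Int :=
  if k = 1 then 1
  else if 2 ≤ k ∧ ((k.Prime ∧ k ≤ i) ∨ (¬ k.Prime ∧ k / k.minFac ≤ i)) then muSpec k
  else 0

def ispPat (i k : Nat) : Bool :=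
  decide (2 ≤ k ∧ (k.Prime ∨ i < k / k.minFac))

def primesUpTo (i : Nat) : List Nat :=
  (List.range (i + 1)).filter (fun q => decide q.Prime)

def InvA (N i : Nat) (st : List Int × List Bool × List Nat) : Prop :=
  st.1.length = N + 1 ∧ st.2.1.length = N + 1 ∧
  st.2.2 = primesUpTo i ∧
  (∀ k, k ≤ N → st.1.getD k 0 = muPat i k) ∧
  (∀ k, k ≤ N → st.2.1.getD k false = ispPat i k)

-- the inner loop writes exactly the positions i*q, q ∈ P prime ≤ minFac i, i*q ≤ N
theorem mfInnerA_spec (N i : Nat) (hi : 2 ≤ i) (P : List Nat)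
    (hsort : P.Pairwise (· < ·)) (hprime : ∀ q ∈ P, q.Prime) (hmem : i.minFac ∈ P)
    (mu : List Int) (isp : List Bool) (hml : mu.length = N + 1) (hil : isp.length = N + 1)
    (hmui : mu.getD i 0 = muSpec i) :
    (mfInnerA N i P mu isp).1.length = N + 1 ∧ (mfInnerA N i P mu isp).2.length = N + 1 ∧
    (∀ k, (∃ q ∈ P, q ≤ i.minFac ∧ i * q ≤ N ∧ k = i * q) →
       (mfInnerA N i P mu isp).1.getD k 0 = muSpec k ∧
       (mfInnerA N i P mu isp).2.getD k false = false) ∧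
    (∀ k, ¬ (∃ q ∈ P, q ≤ i.minFac ∧ i * q ≤ N ∧ k = i * q) →
       (mfInnerA N i P mu isp).1.getD k 0 = mu.getD k 0 ∧
       (mfInnerA N i P mu isp).2.getD k false = isp.getD k false) := by
  induction P generalizing mu isp with
  | nil =>
    refine ⟨hml, hil, fun k hk => ?_, fun k _ => ⟨rfl, rfl⟩⟩
    obtain ⟨q, hq, _⟩ := hk
    simp at hq
  | cons q rest ih =>
    have hq : q.Prime := hprime q List.mem_cons_self
    have hrest_sort := (List.pairwise_cons.mp hsort).2
    have hhead := (List.pairwise_cons.mp hsort).1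
    simp only [mfInnerA]
    split
    · rename_i hNlt
      refine ⟨hml, hil, ?_, fun k _ => ⟨rfl, rfl⟩⟩
      rintro k ⟨q', hq'mem, hle', hNle, rfl⟩
      rcases List.mem_cons.mp hq'mem with rfl | hmem'
      · omega
      · have h1 : q < q' := hhead q' hmem'
        have h2 : i * q < i * q' := (Nat.mul_lt_mul_left (by omega)).mpr h1
        omega
    · rename_i hNge
      have hiqN : i * q ≤ N := by omega
      split
      · rename_i hmod
        have hqdvd : q ∣ i := Nat.dvd_of_mod_eq_zero hmod
        have h1 : i.minFac ≤ q := Nat.minFac_le_of_dvd hq.two_le hqdvd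
        have hqeq : q = i.minFac := by
          rcases List.mem_cons.mp hmem with h | h
          · omega
          · have := hhead _ h; omega
        refine ⟨by simpa using hml, by simpa using hil, ?_, ?_⟩
        · rintro k ⟨q', hq'mem, hle', hNle, rfl⟩
          have hq'q : q' = q := by
            rcases List.mem_cons.mp hq'mem with rfl | hmem'
            · rfl
            · have := hhead _ hmem'; omega
          rw [hq'q]
          constructor
          · rw [getD_set_self _ _ _ _ (by omega)]
            rw [muSpec_mul i q hq hi (by omega), if_pos hmod]
          · rw [getD_set_self _ _ _ _ (by omega)]
        · intro k hk
          have hkne : k ≠ i * q := fun h => hk ⟨q, List.mem_cons_self, by omega, hiqN, h⟩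
          exact ⟨getD_set_ne _ _ _ _ _ hkne, getD_set_ne _ _ _ _ _ hkne⟩
      · rename_i hmod
        have hqne : q ≠ i.minFac := fun h =>
          hmod (by rw [h]; exact Nat.dvd_iff_mod_eq_zero.mp (Nat.minFac_dvd i))
        have hmemr : i.minFac ∈ rest := by
          rcases List.mem_cons.mp hmem with h | h
          · exact absurd h.symm hqne
          · exact h
        have hqlt : q < i.minFac := hhead _ hmemr
        have hiq2 : i * 2 ≤ i * q := Nat.mul_le_mul_left i hq.two_le
        have hine : i ≠ i * q := by omega
        have hml' : (mu.set (i * q) (-(mu.getD i 0))).length = N + 1 := by simpa using hml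
        have hil' : (isp.set (i * q) false).length = N + 1 := by simpa using hil
        have hmui' : (mu.set (i * q) (-(mu.getD i 0))).getD i 0 = muSpec i := by
          rw [getD_set_ne _ _ _ _ _ hine]; exact hmui
        obtain ⟨ihl1, ihl2, ihW, ihU⟩ := ih hrest_sort
          (fun q' h => hprime q' (List.mem_cons_of_mem _ h)) hmemr _ _ hml' hil' hmui'
        refine ⟨ihl1, ihl2, ?_, ?_⟩
        · rintro k ⟨q', hq'mem, hle', hNle, hkeq⟩
          rcases List.mem_cons.mp hq'mem with hq'q | hmem'
          · rw [hq'q] at hkeq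
            have hnot : ¬ ∃ a ∈ rest, a ≤ i.minFac ∧ i * a ≤ N ∧ k = i * a := by
              rintro ⟨a, hamem, _, _, hka⟩
              have h1 : q < a := hhead _ hamem
              have h2 : i * q < i * a := (Nat.mul_lt_mul_left (by omega)).mpr h1
              omega
            obtain ⟨hU1, hU2⟩ := ihU k hnot
            constructor
            · rw [hU1, hkeq, getD_set_self _ _ _ _ (by omega),
                muSpec_mul i q hq hi (by omega), if_neg hmod, hmui]
            · rw [hU2, hkeq, getD_set_self _ _ _ _ (by omega)]
          · exact ihW k ⟨q', hmem', hle', hNle, hkeq⟩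
        · intro k hk
          have hknW : ¬ ∃ a ∈ rest, a ≤ i.minFac ∧ i * a ≤ N ∧ k = i * a := by
            rintro ⟨a, hamem, h1, h2, h3⟩
            exact hk ⟨a, List.mem_cons_of_mem _ hamem, h1, h2, h3⟩
          have hkne : k ≠ i * q := fun h => hk ⟨q, List.mem_cons_self, by omega, hiqN, h⟩
          obtain ⟨hU1, hU2⟩ := ihU k hknW
          refine ⟨?_, ?_⟩
          · rw [hU1]; exact getD_set_ne _ _ _ _ _ hkne
          · rw [hU2]; exact getD_set_ne _ _ _ _ _ hkne

-- the written set is exactly the composites ≤ N with cofactor i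
theorem written_iff (N i k : Nat) (h1 : 1 ≤ i) :
    (∃ q ∈ primesUpTo (i + 1), q ≤ (i + 1).minFac ∧ (i + 1) * q ≤ N ∧ k = (i + 1) * q) ↔
    (2 ≤ k ∧ ¬ k.Prime ∧ k ≤ N ∧ k / k.minFac = i + 1) := by
  constructor
  · rintro ⟨q, hqmem, hle, hNle, rfl⟩
    have hq : q.Prime := by
      simp only [primesUpTo, List.mem_filter, List.mem_range, decide_eq_true_eq] at hqmem
      exact hqmem.2
    have hmf : ((i + 1) * q).minFac = q := minFac_mul_eq (i + 1) q hq (by omega) hle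
    have h4 : 2 * 2 ≤ (i + 1) * q := Nat.mul_le_mul (by omega) hq.two_le
    have h2q : 2 * q ≤ (i + 1) * q := Nat.mul_le_mul_right q (by omega)
    refine ⟨by omega, ?_, hNle, by rw [hmf]; exact Nat.mul_div_cancel _ hq.pos⟩
    intro hp
    have := hp.minFac_eq
    rw [hmf] at this
    omega
  · rintro ⟨h2, hnp, hkN, hcof⟩
    have hq : k.minFac.Prime := Nat.minFac_prime (by omega)
    have hdvd : k.minFac ∣ k := Nat.minFac_dvd k
    have hkeq : k = (i + 1) * k.minFac := by
      rw [← hcof]; exact (Nat.div_mul_cancel hdvd).symm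
    have hi1dvd : (i + 1) ∣ k := ⟨k.minFac, hkeq⟩
    have hle : k.minFac ≤ (i + 1).minFac := by
      have hcd : (i + 1).minFac ∣ k := dvd_trans (Nat.minFac_dvd _) hi1dvd
      exact Nat.minFac_le_of_dvd (Nat.minFac_prime (by omega)).two_le hcd
    have hmem : k.minFac ∈ primesUpTo (i + 1) := by
      have : (i + 1).minFac ≤ i + 1 := Nat.minFac_le (by omega)
      simp only [primesUpTo, List.mem_filter, List.mem_range, decide_eq_true_eq]
      exact ⟨by omega, hq⟩
    exact ⟨k.minFac, hmem, hle, by omega, hkeq⟩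

theorem muPat_succ (i k : Nat) (hk1 : ¬ (k.Prime ∧ k = i + 1))
    (hk2 : ¬ (¬ k.Prime ∧ k / k.minFac = i + 1)) : muPat (i + 1) k = muPat i k := by
  unfold muPat
  by_cases h1 : k = 1
  · simp [h1]
  · rw [if_neg h1, if_neg h1]
    by_cases hkp : k.Prime
    · have hne : k ≠ i + 1 := fun h => hk1 ⟨hkp, h⟩
      by_cases hki : k ≤ i
      · rw [if_pos ⟨hkp.two_le, Or.inl ⟨hkp, by omega⟩⟩, if_pos ⟨hkp.two_le, Or.inl ⟨hkp, hki⟩⟩]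
      · rw [if_neg, if_neg]
        · rintro ⟨_, h | h⟩ <;> tauto
        · rintro ⟨_, h | h⟩
          · omega
          · tauto
    · have hne : k / k.minFac ≠ i + 1 := fun h => hk2 ⟨hkp, h⟩
      by_cases h2 : 2 ≤ k
      · by_cases hki : k / k.minFac ≤ i
        · rw [if_pos ⟨h2, Or.inr ⟨hkp, by omega⟩⟩, if_pos ⟨h2, Or.inr ⟨hkp, hki⟩⟩]
        · rw [if_neg, if_neg]
          · rintro ⟨_, h | h⟩ <;> tauto
          · rintro ⟨_, h | h⟩
            · tauto
            · omega
      · rw [if_neg (by tauto), if_neg (by tauto)]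

theorem ispPat_succ (i k : Nat) (hk2 : ¬ (¬ k.Prime ∧ k / k.minFac = i + 1)) :
    ispPat (i + 1) k = ispPat i k := by
  unfold ispPat
  rw [decide_eq_decide]
  by_cases hkp : k.Prime
  · tauto
  · have hne : k / k.minFac ≠ i + 1 := fun h => hk2 ⟨hkp, h⟩
    constructor
    · rintro ⟨h2, h | h⟩ <;> [tauto; exact ⟨h2, Or.inr (by omega)⟩]
    · rintro ⟨h2, h | h⟩ <;> [tauto; exact ⟨h2, Or.inr (by omega)⟩]

theorem primesUpTo_succ (i : Nat) :
    primesUpTo (i + 1) = primesUpTo i ++ (if Nat.Prime (i + 1) then [i + 1] else []) := by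
  unfold primesUpTo
  rw [List.range_succ, List.filter_append]
  congr 1
  by_cases hp : (i + 1).Prime <;> simp [hp]

theorem mfStepA_inv (N i : Nat) (st : List Int × List Bool × List Nat)
    (h1 : 1 ≤ i) (hiN : i + 1 ≤ N) (hinv : InvA N i st) :
    InvA N (i + 1) (mfStepA N st (i + 1)) := by
  obtain ⟨mu, isp, primes⟩ := st
  obtain ⟨hml, hil, hpr, hmu, hisp⟩ := hinv
  dsimp only at hml hil hpr hmu hisp
  have hcof := cofactor_lt (i + 1) (by omega)
  have hc : isp.getD (i + 1) false = decide (i + 1).Prime := by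
    rw [hisp (i + 1) (by omega)]
    unfold ispPat
    rw [decide_eq_decide]
    constructor
    · rintro ⟨h2, hpk | hcf⟩
      · exact hpk
      · omega
    · intro hpk; exact ⟨by omega, Or.inl hpk⟩
  -- shared facts about the primes list handed to the inner loop
  have hPsort : (primesUpTo (i + 1)).Pairwise (· < ·) := by
    unfold primesUpTo; exact List.pairwise_lt_range.filter _
  have hPprime : ∀ q ∈ primesUpTo (i + 1), q.Prime := by
    intro q hq
    simp only [primesUpTo, List.mem_filter, List.mem_range, decide_eq_true_eq] at hq
    exact hq.2
  have hPmem : (i + 1).minFac ∈ primesUpTo (i + 1) := by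
    have h1' : (i + 1).minFac ≤ i + 1 := Nat.minFac_le (by omega)
    simp only [primesUpTo, List.mem_filter, List.mem_range, decide_eq_true_eq]
    exact ⟨by omega, Nat.minFac_prime (by omega)⟩
  -- the common continuation, abstracted over the updated mu and primes lists
  have main : ∀ (mu' : List Int), mu'.length = N + 1 →
      mu'.getD (i + 1) 0 = muSpec (i + 1) →
      (∀ k, k ≤ N → k ≠ i + 1 → mu'.getD k 0 = muPat i k) →
      InvA N (i + 1) ((mfInnerA N (i + 1) (primesUpTo (i + 1)) mu' isp).1,
        (mfInnerA N (i + 1) (primesUpTo (i + 1)) mu' isp).2, primesUpTo (i + 1)) := by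
    intro mu' hml' hmui' hmuk'
    obtain ⟨L1, L2, W, U⟩ := mfInnerA_spec N (i + 1) (by omega) (primesUpTo (i + 1))
      hPsort hPprime hPmem mu' isp hml' hil hmui'
    have h2k_of : ∀ k, ¬ k.Prime → k / k.minFac = i + 1 → 2 ≤ k := by
      intro k hnp hcf
      rcases Nat.lt_or_ge k 2 with hk2 | hk2
      · exfalso
        have : k = 0 ∨ k = 1 := by omega
        rcases this with rfl | rfl
        · rw [Nat.minFac_zero] at hcf; omega
        · rw [Nat.minFac_one] at hcf; omega
      · exact hk2
    refine ⟨L1, L2, rfl, ?_, ?_⟩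
    · intro k hk
      by_cases hWk : 2 ≤ k ∧ ¬ k.Prime ∧ k ≤ N ∧ k / k.minFac = i + 1
      · have hex := (written_iff N i k h1).mpr hWk
        rw [(W k hex).1]
        unfold muPat
        rw [if_neg (by omega), if_pos ⟨hWk.1, Or.inr ⟨hWk.2.1, by omega⟩⟩]
      · have hnex := fun hex => hWk ((written_iff N i k h1).mp hex)
        rw [(U k hnex).1]
        by_cases hki : k = i + 1
        · subst hki
          rw [hmui']
          unfold muPat
          by_cases hpk : (i + 1).Prime
          · rw [if_neg (by omega), if_pos ⟨by omega, Or.inl ⟨hpk, le_rfl⟩⟩]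
          · rw [if_neg (by omega), if_pos ⟨by omega, Or.inr ⟨hpk, by omega⟩⟩]
        · rw [hmuk' k hk hki, muPat_succ i k (fun h => hki h.2)
            (fun h => hWk ⟨h2k_of k h.1 h.2, h.1, hk, h.2⟩)]
    · intro k hk
      by_cases hWk : 2 ≤ k ∧ ¬ k.Prime ∧ k ≤ N ∧ k / k.minFac = i + 1
      · have hex := (written_iff N i k h1).mpr hWk
        rw [(W k hex).2, eq_comm]
        unfold ispPat
        rw [decide_eq_false_iff_not]
        rintro ⟨h2, hpk | hcf⟩
        · exact hWk.2.1 hpk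
        · omega
      · have hnex := fun hex => hWk ((written_iff N i k h1).mp hex)
        rw [(U k hnex).2, hisp k hk,
          ispPat_succ i k (fun h => hWk ⟨h2k_of k h.1 h.2, h.1, hk, h.2⟩)]
  unfold mfStepA
  dsimp only
  rw [hpr, hc]
  by_cases hp : (i + 1).Prime
  · rw [if_pos (by simp [hp]), if_pos (by simp [hp])]
    have hpr' : primesUpTo i ++ [i + 1] = primesUpTo (i + 1) := by
      rw [primesUpTo_succ, if_pos hp]
    rw [hpr']
    refine main (mu.set (i + 1) (-1)) (by simpa using hml) ?_ ?_
    · rw [getD_set_self _ _ _ _ (by omega), muSpec_prime _ hp]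
    · intro k hk hki
      rw [getD_set_ne _ _ _ _ _ hki, hmu k hk]
  · rw [if_neg (by simp [hp]), if_neg (by simp [hp])]
    have hpr' : primesUpTo i = primesUpTo (i + 1) := by
      rw [primesUpTo_succ, if_neg hp, List.append_nil]
    rw [hpr']
    refine main mu hml ?_ ?_
    · rw [hmu (i + 1) (by omega)]
      unfold muPat
      rw [if_neg (by omega), if_pos ⟨by omega, Or.inr ⟨hp, by omega⟩⟩]
    · intro k hk _
      exact hmu k hk

theorem foldA_inv (N : Nat) : ∀ (m i : Nat) (st : List Int × List Bool × List Nat),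
    1 ≤ i → i + m = N → InvA N i st →
    InvA N N ((List.range' (i + 1) m).foldl (mfStepA N) st) := by
  intro m
  induction m with
  | zero =>
    intro i st h1 hm hinv
    have : i = N := by omega
    subst this; simpa using hinv
  | succ m ih =>
    intro i st h1 hm hinv
    rw [List.range'_succ, List.foldl_cons]
    exact ih (i + 1) _ (by omega) (by omega) (mfStepA_inv N i st h1 (by omega) hinv)

theorem muA_eq (N : Nat) (hN : 1 ≤ N) :
    mfRunA N = (List.range (N + 1)).map muSpec := by
  have hinit : InvA N 1 ((List.replicate (N + 1) (0 : Int)).set 1 1,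
      ((List.replicate (N + 1) true).set 0 false).set 1 false, ([] : List Nat)) := by
    refine ⟨by simp, by simp, by show ([] : List Nat) = primesUpTo 1; decide, ?_, ?_⟩
    · intro k hk
      dsimp only
      unfold muPat
      by_cases hk1 : k = 1
      · subst hk1
        rw [getD_set_self _ _ _ _ (by simp; omega), if_pos rfl]
      · rw [getD_set_ne _ _ _ _ _ hk1, if_neg hk1]
        have hzero : (List.replicate (N + 1) (0 : Int)).getD k 0 = 0 := by
          simp only [List.getD_eq_getElem?_getD, List.getElem?_replicate]
          split <;> rfl
        rw [hzero, if_neg]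
        rintro ⟨h2, ⟨hpk, hle⟩ | ⟨hnp, hle⟩⟩
        · have := hpk.two_le; omega
        · have := composite_cofactor_ge_two k h2 hnp; omega
    · intro k hk
      dsimp only
      unfold ispPat
      by_cases hk1 : k = 1
      · subst hk1
        rw [getD_set_self _ _ _ _ (by simp; omega), eq_comm, decide_eq_false_iff_not]
        rintro ⟨h2, _⟩; omega
      · rw [getD_set_ne _ _ _ _ _ hk1]
        by_cases hk0 : k = 0
        · subst hk0
          rw [getD_set_self _ _ _ _ (by simp), eq_comm, decide_eq_false_iff_not]
          rintro ⟨h2, _⟩; omega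
        · rw [getD_set_ne _ _ _ _ _ hk0]
          have htrue : (List.replicate (N + 1) true).getD k false = true := by
            simp [List.getD_eq_getElem?_getD, List.getElem?_replicate, show k < N + 1 by omega]
          rw [htrue, eq_comm, decide_eq_true_eq]
          refine ⟨by omega, ?_⟩
          by_cases hpk : k.Prime
          · exact Or.inl hpk
          · exact Or.inr (by have := composite_cofactor_ge_two k (by omega) hpk; omega)
  have hfold := foldA_inv N (N - 1) 1 _ (by omega) (by omega) hinit
  simp only [show (1 : Nat) + 1 = 2 from rfl] at hfold
  obtain ⟨hml, -, -, hmu, -⟩ := hfold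
  unfold mfRunA
  refine List.ext_getElem (by simp [hml]) ?_
  intro k hk1 hk2
  have hkN : k ≤ N := by rw [hml] at hk1; omega
  have hv := hmu k hkN
  rw [List.getD_eq_getElem _ 0 hk1] at hv
  have hpat : muPat N k = muSpec k := by
    unfold muPat
    by_cases hk1' : k = 1
    · subst hk1'; simp [muSpec]
    · rw [if_neg hk1']
      by_cases h2 : 2 ≤ k
      · rw [if_pos]
        refine ⟨h2, ?_⟩
        by_cases hpk : k.Prime
        · exact Or.inl ⟨hpk, hkN⟩
        · exact Or.inr ⟨hpk, by have := cofactor_lt k h2; omega⟩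
      · have hk0 : k = 0 := by omega
        subst hk0
        rw [if_neg (by rintro ⟨h, _⟩; omega)]
        simp [muSpec]
  simp [hv, hpat]

-- B-side
theorem mfSpfLoopB_spec (n : Nat) (hn : 2 ≤ n) : ∀ (f p : Nat), n + 1 - p ≤ f → 2 ≤ p →
    (∀ d, 2 ≤ d → d < p → ¬ d ∣ n) →
    ((mfSpfLoopB n p ∣ n ∧ mfSpfLoopB n p * mfSpfLoopB n p ≤ n ∧ 2 ≤ mfSpfLoopB n p ∧
       ∀ d, 2 ≤ d → d < mfSpfLoopB n p → ¬ d ∣ n)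
     ∨ (n < mfSpfLoopB n p * mfSpfLoopB n p ∧ ∀ d, 2 ≤ d → d * d ≤ n → ¬ d ∣ n)) := by
  intro f
  induction f with
  | zero =>
    intro p hf hp hnd
    have hpp : p ≤ p * p := le_trans (by omega) (Nat.mul_le_mul_right p (by omega : 1 ≤ p))
    rw [mfSpfLoopB]
    split
    · rename_i h; omega
    · rename_i h
      rcases Nat.lt_or_ge n (p * p) with hlt | hge
      · right
        refine ⟨hlt, fun d hd2 hdd hddvd => ?_⟩
        have hdd2 : d ≤ d * d := le_trans (by omega) (Nat.mul_le_mul_right d (by omega : 1 ≤ d))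
        exact hnd d hd2 (by omega) hddvd
      · left
        have hmod : n % p = 0 := by tauto
        exact ⟨Nat.dvd_of_mod_eq_zero hmod, hge, hp, fun d hd2 hdp => hnd d hd2 hdp⟩
  | succ f ih =>
    intro p hf hp hnd
    rw [mfSpfLoopB]
    split
    · rename_i h
      obtain ⟨h1, h2⟩ := h
      have hple : p ≤ p * p := le_trans (by omega) (Nat.mul_le_mul_right p (by omega : 1 ≤ p))
      refine ih (p + 1) (by omega) (by omega) ?_
      intro d hd2 hdp
      rcases Nat.lt_or_ge d p with hlt | hge
      · exact hnd d hd2 hlt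
      · have : d = p := by omega
        subst this
        intro hdvd
        exact h2 (Nat.dvd_iff_mod_eq_zero.mp hdvd)
    · rename_i h
      rcases Nat.lt_or_ge n (p * p) with hlt | hge
      · right
        refine ⟨hlt, fun d hd2 hdd hddvd => ?_⟩
        have hdp : d < p := by
          by_contra hc
          have : p * p ≤ d * d := Nat.mul_le_mul (by omega) (by omega)
          omega
        exact hnd d hd2 hdp hddvd
      · left
        have hmod : n % p = 0 := by tauto
        exact ⟨Nat.dvd_of_mod_eq_zero hmod, hge, hp, fun d hd2 hdp => hnd d hd2 hdp⟩

theorem mfSpfB_eq_minFac (n : Nat) (hn : 2 ≤ n) : mfSpfB n = n.minFac := by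
  have hs := mfSpfLoopB_spec n hn (n + 1) 2 (by omega) (by omega)
    (by intro d hd2 hd; omega)
  unfold mfSpfB
  rcases hs with ⟨hdvd, hsq, hr2, hmin⟩ | ⟨hgt, hnone⟩
  · rw [if_neg (by omega)]
    have hle : n.minFac ≤ mfSpfLoopB n 2 := Nat.minFac_le_of_dvd hr2 hdvd
    have hp := Nat.minFac_prime (show n ≠ 1 by omega)
    have hge : ¬ n.minFac < mfSpfLoopB n 2 := fun hlt =>
      hmin n.minFac hp.two_le hlt (Nat.minFac_dvd n)
    omega
  · rw [if_pos hgt]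
    have hp := Nat.minFac_prime (show n ≠ 1 by omega)
    have hdvd : n.minFac ∣ n := Nat.minFac_dvd n
    by_contra hne
    have hlt : n.minFac ≠ n := fun h => hne h.symm
    have hc2 : 2 ≤ n / n.minFac := by
      have h1 : 1 ≤ n / n.minFac := (Nat.one_le_div_iff hp.pos).mpr (Nat.le_of_dvd (by omega) hdvd)
      rcases Nat.lt_or_ge 1 (n / n.minFac) with h | h
      · omega
      · exfalso
        have h1' : n / n.minFac = 1 := by omega
        have heq := Nat.div_mul_cancel hdvd
        rw [h1', one_mul] at heq
        exact hlt heq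
    have hmc : n.minFac ≤ n / n.minFac := by
      have hcd : (n / n.minFac).minFac ∣ n :=
        dvd_trans (Nat.minFac_dvd _) (Nat.div_dvd_of_dvd hdvd)
      have h1 : n.minFac ≤ (n / n.minFac).minFac :=
        Nat.minFac_le_of_dvd (Nat.minFac_prime (by omega)).two_le hcd
      have h2 : (n / n.minFac).minFac ≤ n / n.minFac := Nat.minFac_le (by omega)
      omega
    have hsq : n.minFac * n.minFac ≤ n := by
      calc n.minFac * n.minFac ≤ n.minFac * (n / n.minFac) := Nat.mul_le_mul_left _ hmc
      _ = n := Nat.mul_div_cancel' hdvd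
    exact hnone n.minFac hp.two_le hsq hdvd

theorem foldB_inv (N : Nat) : ∀ (m n : Nat) (mu : List Int), 1 ≤ n → n + m = N →
    mu.length = N + 1 → (∀ k, k ≤ N → mu.getD k 0 = if k ≤ n then muSpec k else 0) →
    ((List.range' (n + 1) m).foldl mfStepB mu).length = N + 1 ∧
    (∀ k, k ≤ N → ((List.range' (n + 1) m).foldl mfStepB mu).getD k 0 = muSpec k) := by
  intro m
  induction m with
  | zero =>
    intro n mu h1 hm hl hv
    refine ⟨by simpa using hl, fun k hk => ?_⟩
    simpa [show k ≤ n by omega] using hv k hk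
  | succ m ih =>
    intro n mu h1 hm hl hv
    rw [List.range'_succ, List.foldl_cons]
    have hstep : (mfStepB mu (n + 1)).length = N + 1 ∧
        (∀ k, k ≤ N → (mfStepB mu (n + 1)).getD k 0 = if k ≤ n + 1 then muSpec k else 0) := by
      simp only [mfStepB]
      rw [mfSpfB_eq_minFac (n + 1) (by omega)]
      refine ⟨by simpa using hl, fun k hk => ?_⟩
      by_cases hkn : k = n + 1
      · subst hkn
        have hcl := cofactor_lt (n + 1) (by omega)
        have hcv := hv ((n + 1) / (n + 1).minFac) (by omega)
        rw [if_pos (by omega)] at hcv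
        rw [getD_set_self _ _ _ _ (by omega), if_pos le_rfl, muSpec_eq (n + 1) (by omega), hcv]
      · rw [getD_set_ne _ _ _ _ _ hkn, hv k hk]
        by_cases h : k ≤ n
        · rw [if_pos h, if_pos (by omega)]
        · rw [if_neg h, if_neg (by omega)]
    exact ih (n + 1) _ (by omega) (by omega) hstep.1 hstep.2

theorem muB_eq (N : Nat) (hN : 1 ≤ N) :
    mfRunB N = (List.range (N + 1)).map muSpec := by
  have hl0 : ((List.replicate (N + 1) (0 : Int)).set 1 1).length = N + 1 := by simp
  have hv0 : ∀ k, k ≤ N → ((List.replicate (N + 1) (0 : Int)).set 1 1).getD k 0 =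
      if k ≤ 1 then muSpec k else 0 := by
    intro k hk
    by_cases hk1 : k = 1
    · subst hk1
      rw [getD_set_self _ _ _ _ (by simp; omega)]
      simp [muSpec]
    · rw [getD_set_ne _ _ _ _ _ hk1]
      by_cases hk0 : k = 0
      · subst hk0; simp [List.getD_eq_getElem?_getD, muSpec]
      · simp [List.getD_eq_getElem?_getD, List.getElem?_replicate, show k < N + 1 by omega]
        omega
  have h := foldB_inv N (N - 1) 1 _ (by omega) (by omega) hl0 hv0
  unfold mfRunB
  refine List.ext_getElem (by simp [h.1]) ?_
  intro k hk1 hk2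
  have hkN : k ≤ N := by simp [h.1] at hk1; omega
  have := h.2 k hkN
  rw [List.getD_eq_getElem _ 0 hk1] at this
  simp [this]

-- ===== VERDICT (by name: the statement is the Claim_ definition above) =====
theorem mertens_function_spec : Claim_equal_mertens_function := by
  intro max_n _ hpre
  have hN : 1 ≤ max_n.toNat := by
    unfold Pre_mertens_function at hpre; omega
  unfold Spec_mertens_function mertens_function mertens_function_alt mfPrefixA mfPrefixB
  rw [muA_eq _ hN, muB_eq _ hN]
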